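-- pv_equiv track=rewrite | github.com/anakduaribu/chatbotrendom | bm.py | lastOccurence
-- ===== SOURCE A (Python) =====
-- def lastOccurence(string, size):
--     listLO = [-1 for i in range(256)]
--
--     for i in range(size):
--         if (ord(string[i])-32>=65 and ord(string[i])-32<=90):
--             listLO[ord(string[i])-32] = i
--         if (ord(string[i])+32>=97 and ord(string[i])+32<=122):
--             listLO[ord(string[i])+32] = i
--         listLO[ord(string[i])] = i;
--
--     return listLO
-- ===== SOURCE B (Python) =====
-- def lastOccurence(string, size):
--     listLO = [-1] * 256
--     for i in range(size - 1, -1, -1):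
--         c = ord(string[i])
--         if 97 <= c <= 122:
--             slots = (c, c - 32)
--         elif 65 <= c <= 90:
--             slots = (c, c + 32)
--         else:
--             slots = (c,)
--         for k in slots:
--             if listLO[k] == -1:
--                 listLO[k] = i
--     return listLO
-- ===== Notes on version B (the rewrite author's own statement) =====
-- stated objective: alternative
-- what changed: B scans the prefix back-to-front with first-write-wins (skip slots already filled) instead of A's forward scan with unconditional overwrites and inline per-case conditional writes; Pre_ excludes size > len(string), where A raises IndexError (B raises there too).
import Mathlib
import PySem

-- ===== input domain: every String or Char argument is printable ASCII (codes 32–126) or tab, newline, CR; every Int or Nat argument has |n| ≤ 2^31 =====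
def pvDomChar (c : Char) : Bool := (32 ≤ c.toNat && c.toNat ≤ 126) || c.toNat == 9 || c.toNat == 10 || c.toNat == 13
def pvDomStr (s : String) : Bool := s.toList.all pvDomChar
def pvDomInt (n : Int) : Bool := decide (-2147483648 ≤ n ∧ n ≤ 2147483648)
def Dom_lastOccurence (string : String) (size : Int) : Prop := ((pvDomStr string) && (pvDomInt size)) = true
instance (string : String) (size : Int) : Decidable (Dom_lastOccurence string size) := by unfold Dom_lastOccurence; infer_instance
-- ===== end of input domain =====

-- B replaces A's forward overwrite loop (inline conditional case-pair writes) by a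
-- back-to-front scan where the first write to a slot wins; same cost, different traversal.

-- ===== PORT A =====
-- one loop iteration of A: the two conditional case-sibling writes, then the unconditional write
def lastOccA_step (string : String) (st : List Int) (i : Int) : List Int :=
  match PySem.Str.pyGet? string i with
  | none => st       -- string[i] out of range: Python raises IndexError; excluded by Pre_
  | some ch =>
    let c : Int := ch.toNat
    let st1 := if c - 32 ≥ 65 ∧ c - 32 ≤ 90 then st.set (c - 32).toNat i else st
    let st2 := if c + 32 ≥ 97 ∧ c + 32 ≤ 122 then st1.set (c + 32).toNat i else st1
    st2.set c.toNat i

def lastOccurence (string : String) (size : Int) : List Int :=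
  (PySem.List.pyRange 0 size 1).foldl (lastOccA_step string) (List.replicate 256 (-1))

-- ===== PORT B =====
-- the slots (own code plus the case sibling for letters) written for character code c
def lastOccB_slots (c : Nat) : List Nat :=
  if 97 ≤ c ∧ c ≤ 122 then [c, c - 32]
  else if 65 ≤ c ∧ c ≤ 90 then [c, c + 32]
  else [c]

-- one backward iteration: fill each slot only if it is still -1
-- (the slot read/write listLO[k] is ported with getD/set at the nonnegative code k;
--  every character admitted by Dom_ has code < 256, so this is exact there)
def lastOccB_step (string : String) (st : List Int) (i : Int) : List Int :=
  match PySem.Str.pyGet? string i with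
  | none => st       -- string[i] out of range: Python raises IndexError; excluded by Pre_
  | some ch =>
    (lastOccB_slots ch.toNat).foldl
      (fun st k => if st.getD k (-1) = -1 then st.set k i else st) st

def lastOccurence_alt (string : String) (size : Int) : List Int :=
  (PySem.List.pyRange (size - 1) (-1) (-1)).foldl (lastOccB_step string) (List.replicate 256 (-1))

-- ===== PRECONDITION & SPEC =====
-- Pre_ excludes exactly size > len(string), where Python A raises IndexError at string[i] (B raises there too).
def Pre_lastOccurence (string : String) (size : Int) : Prop :=
  size ≤ (string.toList.length : Int)
instance (string : String) (size : Int) : Decidable (Pre_lastOccurence string size) := by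
  unfold Pre_lastOccurence; infer_instance

def pvWitness_lastOccurence : String × Int := ("abBA z", 6)

def Spec_lastOccurence (string : String) (size : Int) (out : List Int) : Prop := out = lastOccurence_alt string size
instance (string : String) (size : Int) (out : List Int) : Decidable (Spec_lastOccurence string size out) := by unfold Spec_lastOccurence; infer_instance

-- ===== CLAIM (what is proved, stated in full; the proofs are below) =====
def Claim_equal_lastOccurence : Prop := ∀ (string : String) (size : Int), Dom_lastOccurence string size → Pre_lastOccurence string size → Spec_lastOccurence string size (lastOccurence string size)

-- ===== LEMMAS AND PROOFS =====

-- does iteration i write slot k? (the same set of slots is written by A's and B's step)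
def pvMatch (string : String) (k : Nat) (i : Int) : Bool :=
  match PySem.Str.pyGet? string i with
  | none => false
  | some ch =>
    let c := ch.toNat
    decide (k = c ∨ (97 ≤ c ∧ c ≤ 122 ∧ k = c - 32) ∨ (65 ≤ c ∧ c ≤ 90 ∧ k = c + 32))

theorem pv_getD_set (l : List Int) (j k : Nat) (v : Int) :
    (l.set j v).getD k (-1) = if j = k ∧ j < l.length then v else l.getD k (-1) := by
  simp [List.getD_eq_getElem?_getD, List.getElem?_set]
  split_ifs <;> simp_all <;> omega

theorem pv_astep_getD (string : String) (st : List Int) (i : Int) (k : Nat)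
    (hlen : st.length = 256) (hk : k < 256) :
    (lastOccA_step string st i).getD k (-1) =
      if pvMatch string k i then i else st.getD k (-1) := by
  unfold lastOccA_step pvMatch
  cases h : PySem.Str.pyGet? string i with
  | none => simp
  | some ch =>
    dsimp only
    simp only [decide_eq_true_eq]
    split_ifs with h1 h2 h3 h4 h5 h6 <;>
      simp only [pv_getD_set, List.length_set, hlen] <;>
      split_ifs <;> omega

theorem pv_ite_set_length (P : Prop) [Decidable P] (st : List Int) (j : Nat) (v : Int) :
    (if P then st.set j v else st).length = st.length := by
  split_ifs <;> simp

theorem pv_ite_set_getD (P : Prop) [Decidable P] (st : List Int) (j k : Nat) (v : Int) :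
    ((if P then st.set j v else st)).getD k (-1) =
      if P ∧ j = k ∧ j < st.length then v else st.getD k (-1) := by
  split_ifs with h h1 h2
  · rw [pv_getD_set, if_pos ⟨h1.2.1, h1.2.2⟩]
  · rw [pv_getD_set, if_neg (fun hc => h1 ⟨h, hc⟩)]
  · exact absurd h2.1 h
  · rfl

theorem pv_write2_getD (st : List Int) (j1 j2 k : Nat) (i : Int)
    (hne : j1 ≠ j2) (hj1 : j1 < st.length) (hj2 : j2 < st.length) :
    ((if (if st.getD j1 (-1) = -1 then st.set j1 i else st).getD j2 (-1) = -1
       then (if st.getD j1 (-1) = -1 then st.set j1 i else st).set j2 i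
       else (if st.getD j1 (-1) = -1 then st.set j1 i else st)).getD k (-1)) =
      if (k = j1 ∨ k = j2) ∧ st.getD k (-1) = -1 then i else st.getD k (-1) := by
  simp only [pv_ite_set_getD, pv_ite_set_length]
  by_cases e1 : k = j1
  · subst e1; split_ifs <;> omega
  · by_cases e2 : k = j2
    · subst e2; split_ifs <;> omega
    · split_ifs <;> omega

theorem pv_bstep_getD (string : String) (st : List Int) (i : Int) (k : Nat)
    (hlen : st.length = 256) (hk : k < 256) :
    (lastOccB_step string st i).getD k (-1) =
      if pvMatch string k i ∧ st.getD k (-1) = -1 then i else st.getD k (-1) := by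
  unfold lastOccB_step lastOccB_slots pvMatch
  cases h : PySem.Str.pyGet? string i with
  | none => simp
  | some ch =>
    dsimp only
    simp only [decide_eq_true_eq]
    split_ifs with h1 h2 h3 h4 h5 <;> simp only [List.foldl_cons, List.foldl_nil]
    · rw [pv_write2_getD st ch.toNat (ch.toNat - 32) k i (by omega) (by omega) (by omega)]
      rw [if_pos]; exact ⟨by omega, h2.2⟩
    · rw [pv_write2_getD st ch.toNat (ch.toNat - 32) k i (by omega) (by omega) (by omega)]
      rw [if_neg]; intro hc; exact h2 ⟨by omega, hc.2⟩
    · rw [pv_write2_getD st ch.toNat (ch.toNat + 32) k i (by omega) (by omega) (by omega)]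
      rw [if_pos]; exact ⟨by omega, h4.2⟩
    · rw [pv_write2_getD st ch.toNat (ch.toNat + 32) k i (by omega) (by omega) (by omega)]
      rw [if_neg]; intro hc; exact h4 ⟨by omega, hc.2⟩
    · have hkc : k = ch.toNat := by omega
      subst hkc
      rw [pv_ite_set_getD, if_pos ⟨h5.2, rfl, by omega⟩]
    · rw [pv_ite_set_getD, if_neg]
      intro hc
      exact h5 ⟨Or.inl hc.2.1.symm, by rw [← hc.2.1]; exact hc.1⟩

theorem pv_astep_length (string : String) (st : List Int) (i : Int) :
    (lastOccA_step string st i).length = st.length := by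
  unfold lastOccA_step
  cases h : PySem.Str.pyGet? string i
  · rfl
  · dsimp only
    split_ifs <;> simp

theorem pv_bstep_length (string : String) (st : List Int) (i : Int) :
    (lastOccB_step string st i).length = st.length := by
  unfold lastOccB_step lastOccB_slots
  cases h : PySem.Str.pyGet? string i
  · rfl
  · dsimp only
    split_ifs <;>
      simp only [List.foldl_cons, List.foldl_nil, pv_ite_set_length]

theorem pv_foldA_length (string : String) (xs : List Int) (st : List Int) :
    (xs.foldl (lastOccA_step string) st).length = st.length := by
  induction xs generalizing st with
  | nil => rfl
  | cons x xs ih => rw [List.foldl_cons, ih, pv_astep_length]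

theorem pv_foldB_length (string : String) (xs : List Int) (st : List Int) :
    (xs.foldl (lastOccB_step string) st).length = st.length := by
  induction xs generalizing st with
  | nil => rfl
  | cons x xs ih => rw [List.foldl_cons, ih, pv_bstep_length]

theorem pv_foldA (string : String) (xs : List Int) (st : List Int) (k : Nat)
    (hlen : st.length = 256) (hk : k < 256) :
    ((xs.foldl (lastOccA_step string) st).getD k (-1)) =
      (match xs.reverse.find? (pvMatch string k) with
       | some i => i
       | none => st.getD k (-1)) := by
  induction xs generalizing st with
  | nil => simp
  | cons x xs ih =>
    rw [List.foldl_cons, ih _ (by rw [pv_astep_length]; exact hlen),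
        List.reverse_cons, List.find?_append]
    cases hfind : xs.reverse.find? (pvMatch string k) with
    | some j => simp [hfind]
    | none =>
      rw [pv_astep_getD string st x k hlen hk]
      cases hp : pvMatch string k x
      · simp [hfind, hp]
      · simp [hfind, hp]

theorem pv_foldB (string : String) (xs : List Int) (st : List Int) (k : Nat)
    (hlen : st.length = 256) (hk : k < 256) (hx : ∀ x ∈ xs, (0:Int) ≤ x) :
    ((xs.foldl (lastOccB_step string) st).getD k (-1)) =
      if st.getD k (-1) = -1 then
        (match xs.find? (pvMatch string k) with
         | some i => i
         | none => -1)
      else st.getD k (-1) := by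
  induction xs generalizing st with
  | nil => by_cases hc : st.getD k (-1) = -1 <;> simp [hc]
  | cons x xs ih =>
    have hx0 : (0:Int) ≤ x := hx x List.mem_cons_self
    have hxne : x ≠ -1 := by omega
    rw [List.foldl_cons,
        ih _ (by rw [pv_bstep_length]; exact hlen) (fun y hy => hx y (List.mem_cons_of_mem _ hy)),
        pv_bstep_getD string st x k hlen hk]
    cases hp : pvMatch string k x
    · have hb : (if false = true ∧ st.getD k (-1) = -1 then x else st.getD k (-1)) = st.getD k (-1) := if_neg (by simp)
      rw [List.find?_cons_of_neg (by simp [hp]), hb]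
    · rw [List.find?_cons_of_pos (l := xs) hp]
      by_cases hs : st.getD k (-1) = -1
      · have hb : (if true = true ∧ st.getD k (-1) = -1 then x else st.getD k (-1)) = x := if_pos ⟨rfl, hs⟩
        rw [hb, if_neg hxne, if_pos hs]
      · have hb : (if true = true ∧ st.getD k (-1) = -1 then x else st.getD k (-1)) = st.getD k (-1) := if_neg (fun hc => hs hc.2)
        rw [hb, if_neg hs, if_neg hs]

-- ===== VERDICT (by name: the statement is the Claim_ definition above) =====
theorem lastOccurence_spec : Claim_equal_lastOccurence := by
  intro string size hdom hpre
  unfold Spec_lastOccurence lastOccurence lastOccurence_alt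
  have hrev : PySem.List.pyRange (size - 1) (-1) (-1) = (PySem.List.pyRange 0 size 1).reverse := by
    rw [PySem.List.pyRange_neg_one_eq_reverse]; norm_num
  have hlen : (List.replicate 256 (-1 : Int)).length = 256 := List.length_replicate
  apply List.ext_getElem
  · rw [pv_foldA_length, pv_foldB_length]
  · intro k hk1 hk2
    have hk : k < 256 := by rw [pv_foldA_length, hlen] at hk1; exact hk1
    have hx : ∀ x ∈ (PySem.List.pyRange (size - 1) (-1) (-1)), (0:Int) ≤ x := by
      intro x hxmem
      rw [PySem.List.mem_pyRange_neg_one] at hxmem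
      omega
    rw [← List.getD_eq_getElem _ (-1) hk1, ← List.getD_eq_getElem _ (-1) hk2,
        pv_foldA string _ _ k hlen hk, pv_foldB string _ _ k hlen hk hx, hrev]
    have hrep : (List.replicate 256 (-1 : Int)).getD k (-1) = -1 := by
      rw [List.getD_eq_getElem?_getD, List.getElem?_replicate]
      split_ifs <;> rfl
    rw [hrep, if_pos rfl]
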